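-- pv_equiv track=rewrite | github.com/suhasgumma/Problem-Solving | codeForces/Round715Div2/B.py | solve
-- ===== SOURCE A (Python) =====
-- def solve(string, n):
--     tList = []
--     mList = []
--
--
--     for i in range(n):
--         if string[i] == 'T':
--             tList.append(i)
--
--         else: mList.append(i)
--
--     if len(tList) != (2* len(mList)): return False
--
--     lm = len(mList)
--
--     for i in range(lm):
--         if tList[i] > mList[i]: return False
--
--         if tList[i+lm] < mList[i]: return False
--
--
--     return True
-- ===== SOURCE B (Python) =====
-- def _scan(string, idxs):
--     """Run the counter invariant over the given index order.
--     Returns None as soon as the running T-count drops below the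
--     running M-count (checked at each non-'T'), else the final counts."""
--     tT = tM = 0
--     for i in idxs:
--         if string[i] == 'T':
--             tT += 1
--         else:
--             tM += 1
--             if tT < tM:
--                 return None
--     return (tT, tM)
--
--
-- def solve(string, n):
--     fwd = _scan(string, range(n))
--     if fwd is None:
--         return False
--     tT, tM = fwd
--     if tT != 2 * tM:
--         return False
--     return _scan(string, range(n - 1, -1, -1)) is not None
-- ===== Notes on version B (the rewrite author's own statement) =====
-- stated objective: simpler
-- what changed: Replaces building two index lists plus a second positional-comparison loop by two counter scans (forward and backward) that check the running T-count never falls below the running M-count plus the total-count equality; no lists are materialised and the scan exits early on the first violation.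
import Mathlib
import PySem

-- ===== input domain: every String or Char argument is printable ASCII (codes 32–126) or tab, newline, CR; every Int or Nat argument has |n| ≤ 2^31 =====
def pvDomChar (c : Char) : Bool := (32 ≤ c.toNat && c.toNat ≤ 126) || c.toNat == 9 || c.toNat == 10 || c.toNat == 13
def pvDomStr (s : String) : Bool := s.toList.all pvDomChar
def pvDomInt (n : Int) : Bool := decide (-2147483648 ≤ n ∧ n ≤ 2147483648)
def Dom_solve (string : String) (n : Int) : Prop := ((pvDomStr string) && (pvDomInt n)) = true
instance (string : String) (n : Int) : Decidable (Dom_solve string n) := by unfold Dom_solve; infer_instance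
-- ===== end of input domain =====

-- B replaces A's two index lists and positional comparisons by two counter scans
-- (forward and backward) over the same indices; objective: simpler (O(1) extra space).

-- ===== PORT A =====
-- A's second loop (with its early returns) as structural recursion over the range list;
-- pyGetD's default 0 is never consulted: every index this Python loop uses is in range.
def solveLoop2 (tList mList : List Int) (lm : Int) : List Int → Bool
  | [] => true
  | i :: rest =>
    if PySem.List.pyGetD tList i 0 > PySem.List.pyGetD mList i 0 then false
    else if PySem.List.pyGetD tList (i + lm) 0 < PySem.List.pyGetD mList i 0 then false
    else solveLoop2 tList mList lm rest

def solve (string : String) (n : Int) : Bool :=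
  let lists := (PySem.List.pyRange 0 n 1).foldl
    (fun (acc : List Int × List Int) i =>
      match PySem.List.pyGet? string.toList i with
      | some c => if c = 'T' then (acc.1 ++ [i], acc.2) else (acc.1, acc.2 ++ [i])
      | none => acc)   -- unreachable under Pre_solve (Python raises IndexError there)
    ([], [])
  if ¬ ((lists.1.length : Int) = 2 * (lists.2.length : Int)) then false
  else solveLoop2 lists.1 lists.2 (lists.2.length : Int)
         (PySem.List.pyRange 0 (lists.2.length : Int) 1)

-- ===== PORT B =====
-- port of Source B's _scan: counters tT/tM over an index list; none = early False
-- (or IndexError, which Pre_solve excludes).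
def countScan (cs : List Char) (tT tM : Int) : List Int → Option (Int × Int)
  | [] => some (tT, tM)
  | i :: rest =>
    match PySem.List.pyGet? cs i with
    | some c =>
      if c = 'T' then countScan cs (tT + 1) tM rest
      else if tT < tM + 1 then none else countScan cs tT (tM + 1) rest
    | none => none

def solve_alt (string : String) (n : Int) : Bool :=
  match countScan string.toList 0 0 (PySem.List.pyRange 0 n 1) with
  | none => false
  | some (tT, tM) =>
    if ¬ (tT = 2 * tM) then false
    else (countScan string.toList 0 0 (PySem.List.pyRange (n - 1) (-1) (-1))).isSome

-- ===== PRECONDITION & SPEC =====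
-- Pre_solve excludes exactly n > len(string), where the Python A raises IndexError.
def Pre_solve (string : String) (n : Int) : Prop := n ≤ PySem.Str.len string
instance (string : String) (n : Int) : Decidable (Pre_solve string n) := by unfold Pre_solve; infer_instance
def pvWitness_solve : String × Int := ("TMT", 3)

def Spec_solve (string : String) (n : Int) (out : Bool) : Prop := out = solve_alt string n
instance (string : String) (n : Int) (out : Bool) : Decidable (Spec_solve string n out) := by unfold Spec_solve; infer_instance

-- ===== CLAIM (what is proved, stated in full; the proofs are below) =====
def Claim_equal_solve : Prop := ∀ (string : String) (n : Int), Dom_solve string n → Pre_solve string n → Spec_solve string n (solve string n)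

-- ===== LEMMAS AND PROOFS =====

-- predicates: a char is a 'T' / is not (A's else-branch)
def pT : Char → Bool := fun c => c = 'T'
def pM : Char → Bool := fun c => ¬ (c = 'T')

-- positions (0-based) of the chars satisfying p, in increasing order
def posP (p : Char → Bool) : List Char → List Nat
  | [] => []
  | c :: r => if p c then 0 :: (posP p r).map (· + 1) else (posP p r).map (· + 1)

lemma length_posP (p : Char → Bool) (l : List Char) : (posP p l).length = l.countP p := by
  induction l with
  | nil => rfl
  | cons c r ih =>
    simp only [posP, List.countP_cons]
    split <;> simp_all

lemma pairwise_posP (p : Char → Bool) (l : List Char) : (posP p l).Pairwise (· < ·) := by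
  induction l with
  | nil => exact List.Pairwise.nil
  | cons c r ih =>
    have hmap : ((posP p r).map (· + 1)).Pairwise (· < ·) := by
      rw [List.pairwise_map]; exact ih.imp (by omega)
    simp only [posP]
    split
    · exact List.Pairwise.cons (by simp) hmap
    · exact hmap

lemma mem_posP {p : Char → Bool} {l : List Char} {q : Nat} (h : q ∈ posP p l) :
    ∃ hq : q < l.length, p (l[q]'hq) := by
  induction l generalizing q with
  | nil => simp [posP] at h
  | cons c r ih =>
    simp only [posP] at h
    by_cases hc : p c
    · simp [hc] at h
      rcases h with h0 | ⟨q', hq', rfl⟩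
      · subst h0; exact ⟨by simp, by simpa using hc⟩
      · obtain ⟨hlt, hp⟩ := ih hq'
        exact ⟨by simpa using hlt, by simpa using hp⟩
    · simp [hc] at h
      rcases h with ⟨q', hq', rfl⟩
      obtain ⟨hlt, hp⟩ := ih hq'
      exact ⟨by simpa using hlt, by simpa using hp⟩

lemma countP_lt_posP (p : Char → Bool) (l : List Char) (k : Nat) :
    (posP p l).countP (fun q => decide (q < k)) = (l.take k).countP p := by
  induction l generalizing k with
  | nil => simp [posP]
  | cons c r ih =>
    cases k with
    | zero => simp [List.countP_eq_zero]
    | succ k =>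
      have hmap : ((posP p r).map (· + 1)).countP (fun q => decide (q < k + 1))
          = (r.take k).countP p := by
        rw [List.countP_map, ← ih k]
        apply List.countP_congr; intro q _
        simp
      simp only [posP, List.take_succ_cons, List.countP_cons]
      split
      · rw [List.countP_cons, hmap]; simp
      · rw [hmap]; omega

lemma sorted_getElem_lt_iff {s : List Nat} (hs : s.Pairwise (· < ·)) (i k : Nat)
    (hi : i < s.length) : s[i] < k ↔ i < s.countP (fun q => decide (q < k)) := by
  induction s generalizing i with
  | nil => simp at hi
  | cons a t ih =>
    have ha : ∀ b ∈ t, a < b := fun b hb => List.rel_of_pairwise_cons hs hb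
    have ht : t.Pairwise (· < ·) := hs.of_cons
    by_cases hak : a < k
    · cases i with
      | zero => simp [List.countP_cons, hak]
      | succ i =>
        have hi' : i < t.length := by simpa using hi
        have hcnt : (a :: t).countP (fun q => decide (q < k))
            = t.countP (fun q => decide (q < k)) + 1 := by
          simp [List.countP_cons, hak]
        simp only [List.getElem_cons_succ, hcnt]
        rw [ih ht i hi']
        omega
    · have hzero : t.countP (fun q => decide (q < k)) = 0 := by
        rw [List.countP_eq_zero]
        intro b hb; have := ha b hb; simp; omega
      cases i with
      | zero => simp [List.countP_cons, hak, hzero]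
      | succ i =>
        have hi' : i < t.length := by simpa using hi
        have hbk : ¬ t[i] < k := by have := ha t[i] (List.getElem_mem hi'); omega
        simp [List.countP_cons, hak, hzero, hbk]

lemma posP_append (p : Char → Bool) (xs ys : List Char) :
    posP p (xs ++ ys) = posP p xs ++ (posP p ys).map (· + xs.length) := by
  induction xs with
  | nil => simp [posP]
  | cons c xs ih =>
    simp only [List.cons_append, posP, ih, List.map_append, List.map_map]
    have h2 : ((· + 1) ∘ (· + xs.length)) = (· + (xs.length + 1) : Nat → Nat) := by
      funext q; simp; omega
    split <;> simp [h2, List.length_cons]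

lemma posP_reverse (p : Char → Bool) (l : List Char) :
    posP p l.reverse = ((posP p l).map (fun q => l.length - 1 - q)).reverse := by
  induction l with
  | nil => rfl
  | cons c r ih =>
    have hsingle : posP p [c] = if p c then [0] else [] := by simp [posP]
    rw [List.reverse_cons, posP_append, ih, hsingle]
    have hcomp : ((fun q : Nat => (c :: r).length - 1 - q) ∘ (· + 1))
        = fun q : Nat => r.length - 1 - q := by
      funext q; simp [List.length_cons]; omega
    by_cases hc : p c <;>
      simp [posP, hc, List.map_map, hcomp, List.length_reverse, List.length_cons] <;>
      exact fun a _ => by omega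

-- A's two positional conditions, stated over the position lists
def IdxF (l : List Char) : Prop :=
  ∀ i, i < (posP pM l).length → (posP pT l).getD i 0 ≤ (posP pM l).getD i 0
def IdxB (l : List Char) : Prop :=
  ∀ i, i < (posP pM l).length →
    (posP pM l).getD i 0 ≤ (posP pT l).getD (i + (posP pM l).length) 0

-- central lemma: the positional comparison equals the prefix-count invariant
lemma L1 (l : List Char) (hlen : l.countP pM ≤ l.countP pT) :
    IdxF l ↔ (∀ k : Nat, (l.take k).countP pM ≤ (l.take k).countP pT) := by
  have hlt : (posP pT l).length = l.countP pT := length_posP _ _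
  have hlm : (posP pM l).length = l.countP pM := length_posP _ _
  constructor
  · intro h k
    set j := (l.take k).countP pM with hjdef
    rcases Nat.eq_zero_or_pos j with hj0 | hjpos
    · omega
    · have hjm : (posP pM l).countP (fun q => decide (q < k)) = j := countP_lt_posP _ _ _
      have hjlen : j ≤ (posP pM l).length := by
        rw [← hjm]; exact List.countP_le_length
      have him : j - 1 < (posP pM l).length := by omega
      have hm : (posP pM l)[j-1] < k := by
        rw [sorted_getElem_lt_iff (pairwise_posP _ _) _ _ him, hjm]; omega
      have hit : j - 1 < (posP pT l).length := by omega
      have hle := h (j-1) him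
      rw [List.getD_eq_getElem _ _ hit, List.getD_eq_getElem _ _ him] at hle
      have ht : (posP pT l)[j-1]'hit < k := lt_of_le_of_lt hle hm
      have := (sorted_getElem_lt_iff (pairwise_posP pT l) (j-1) k hit).mp ht
      rw [countP_lt_posP] at this
      omega
  · intro h i hi
    have hit : i < (posP pT l).length := by omega
    have h1 : i < (posP pM l).countP (fun q => decide (q < (posP pM l)[i]'hi + 1)) := by
      rw [← sorted_getElem_lt_iff (pairwise_posP _ _) _ _ hi]; omega
    rw [countP_lt_posP] at h1
    have h2 : i < (posP pT l).countP (fun q => decide (q < (posP pM l)[i]'hi + 1)) := by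
      rw [countP_lt_posP]; have := h ((posP pM l)[i]'hi + 1); omega
    have hab : (posP pT l)[i]'hit < (posP pM l)[i]'hi + 1 := by
      rw [sorted_getElem_lt_iff (pairwise_posP _ _) _ _ hit]; exact h2
    rw [List.getD_eq_getElem _ _ hit, List.getD_eq_getElem _ _ hi]
    omega

lemma getD_rev_map (s : List Nat) (f : Nat → Nat) (i : Nat) (hi : i < s.length) :
    ((s.map f).reverse).getD i 0 = f (s.getD (s.length - 1 - i) 0) := by
  have h1 : i < (s.map f).reverse.length := by simpa using hi
  rw [List.getD_eq_getElem _ _ h1, List.getElem_reverse, List.getElem_map,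
      List.getD_eq_getElem _ _ (by omega : s.length - 1 - i < s.length)]
  congr 1
  simp

-- A's second positional condition is the first one on the reversed string
lemma L2 (l : List Char) (hct : l.countP pT = 2 * l.countP pM) :
    IdxB l ↔ IdxF l.reverse := by
  have hlt : (posP pT l).length = l.countP pT := length_posP _ _
  have hlm : (posP pM l).length = l.countP pM := length_posP _ _
  have hlt' : (posP pM l.reverse).length = (posP pM l).length := by
    rw [posP_reverse]; simp
  have hboundT : ∀ j, j < (posP pT l).length → (posP pT l).getD j 0 < l.length := by
    intro j hj
    rw [List.getD_eq_getElem _ _ hj]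
    exact (mem_posP (List.getElem_mem hj)).1
  have hboundM : ∀ j, j < (posP pM l).length → (posP pM l).getD j 0 < l.length := by
    intro j hj
    rw [List.getD_eq_getElem _ _ hj]
    exact (mem_posP (List.getElem_mem hj)).1
  constructor
  · intro h i hi
    rw [hlt'] at hi
    rw [posP_reverse, posP_reverse, getD_rev_map _ _ _ (by omega),
        getD_rev_map _ _ _ (by omega)]
    have e1 : (posP pT l).length - 1 - i
        = ((posP pM l).length - 1 - i) + (posP pM l).length := by omega
    rw [e1]
    have hmain := h ((posP pM l).length - 1 - i) (by omega)
    have hbT := hboundT (((posP pM l).length - 1 - i) + (posP pM l).length) (by omega)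
    have hbM := hboundM ((posP pM l).length - 1 - i) (by omega)
    omega
  · intro h i hi
    have h2 := h ((posP pM l).length - 1 - i) (by rw [hlt']; omega)
    rw [posP_reverse, posP_reverse, getD_rev_map _ _ _ (by omega),
        getD_rev_map _ _ _ (by omega)] at h2
    have e2 : (posP pM l).length - 1 - ((posP pM l).length - 1 - i) = i := by omega
    have e3 : (posP pT l).length - 1 - ((posP pM l).length - 1 - i)
        = i + (posP pM l).length := by omega
    rw [e2, e3] at h2
    have hbT := hboundT (i + (posP pM l).length) (by omega)
    have hbM := hboundM i (by omega)
    omega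

-- char-level version of countScan (indices resolved to the chars they fetch)
def charScan : List Char → Int → Int → Option (Int × Int)
  | [], tT, tM => some (tT, tM)
  | c :: r, tT, tM =>
    if c = 'T' then charScan r (tT + 1) tM
    else if tT < tM + 1 then none else charScan r tT (tM + 1)

lemma countScan_eq_charScan (cs : List Char) (idxs : List Int) (l : List Char)
    (h : idxs.map (fun i => PySem.List.pyGet? cs i) = l.map some) (tT tM : Int) :
    countScan cs tT tM idxs = charScan l tT tM := by
  induction idxs generalizing l tT tM with
  | nil =>
    have : l = [] := by simpa using h.symm
    subst this; rfl
  | cons i rest ih =>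
    cases l with
    | nil => simp at h
    | cons c l' =>
      simp only [List.map_cons, List.cons.injEq] at h
      obtain ⟨h1, h2⟩ := h
      simp only [countScan, h1, charScan]
      split
      · exact ih l' h2 _ _
      · split
        · rfl
        · exact ih l' h2 _ _

lemma charScan_isSome_iff (l : List Char) (tT tM : Int) :
    (charScan l tT tM).isSome ↔
      ∀ k, (hk : k < l.length) → ¬ (l[k]'hk = 'T') →
        tM + ((l.take k).countP pM : Int) + 1 ≤ tT + ((l.take k).countP pT : Int) := by
  induction l generalizing tT tM with
  | nil => simp [charScan]
  | cons c r ih =>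
    by_cases hc : c = 'T'
    · rw [charScan, if_pos hc, ih]
      constructor
      · intro h k hk hnT
        cases k with
        | zero => simp at hnT; exact absurd hc hnT
        | succ j =>
          have hj : j < r.length := by simpa using hk
          have := h j hj (by simpa using hnT)
          simp [List.take_succ_cons, List.countP_cons, pT, pM, hc] at *
          omega
      · intro h k hk hnT
        have := h (k+1) (by simpa using hk) (by simpa using hnT)
        simp [List.take_succ_cons, List.countP_cons, pT, pM, hc] at *
        omega
    · rw [charScan, if_neg hc]
      by_cases hlt : tT < tM + 1
      · rw [if_pos hlt]
        simp only [Option.isSome_none, Bool.false_eq_true, false_iff, not_forall]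
        refine ⟨0, by simp, by simpa using hc, by simp; omega⟩
      · rw [if_neg hlt, ih]
        constructor
        · intro h k hk hnT
          cases k with
          | zero => simp; omega
          | succ j =>
            have hj : j < r.length := by simpa using hk
            have := h j hj (by simpa using hnT)
            simp [List.take_succ_cons, List.countP_cons, pT, pM, hc] at *
            omega
        · intro h k hk hnT
          have := h (k+1) (by simpa using hk) (by simpa using hnT)
          simp [List.take_succ_cons, List.countP_cons, pT, pM, hc] at *
          omega

lemma charScan_eq_some (l : List Char) (tT tM : Int) (h : (charScan l tT tM).isSome) :
    charScan l tT tM = some (tT + (l.countP pT : Int), tM + (l.countP pM : Int)) := by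
  induction l generalizing tT tM with
  | nil => simp [charScan]
  | cons c r ih =>
    by_cases hc : c = 'T'
    · rw [charScan, if_pos hc] at h ⊢
      rw [ih _ _ h]
      simp [List.countP_cons, pT, pM, hc]
      omega
    · rw [charScan, if_neg hc] at h ⊢
      by_cases hlt : tT < tM + 1
      · rw [if_pos hlt] at h; simp at h
      · rw [if_neg hlt] at h ⊢
        rw [ih _ _ h]
        simp [List.countP_cons, pT, pM, hc]
        omega

-- the at-each-M check equals the all-prefixes invariant (counters starting at 0)
lemma prefix_cond (l : List Char) :
    (∀ k, (hk : k < l.length) → ¬ (l[k]'hk = 'T') →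
        (0:Int) + ((l.take k).countP pM : Int) + 1 ≤ 0 + ((l.take k).countP pT : Int))
    ↔ (∀ k : Nat, (l.take k).countP pM ≤ (l.take k).countP pT) := by
  constructor
  · intro h k
    induction k with
    | zero => simp
    | succ j ihj =>
      by_cases hj : j < l.length
      · have htake : l.take (j+1) = l.take j ++ [l[j]'hj] := by
          rw [List.take_succ, List.getElem?_eq_getElem hj]; rfl
        by_cases hT : l[j]'hj = 'T'
        · have hstep : (l.take (j+1)).countP pM = (l.take j).countP pM ∧
              (l.take (j+1)).countP pT = (l.take j).countP pT + 1 := by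
            rw [htake]
            simp only [List.countP_append, List.countP_cons, List.countP_nil, pT, pM]
            simp [hT]
          omega
        · have hInt := h j hj hT
          have hstep : (l.take (j+1)).countP pM = (l.take j).countP pM + 1 ∧
              (l.take (j+1)).countP pT = (l.take j).countP pT := by
            rw [htake]
            simp only [List.countP_append, List.countP_cons, List.countP_nil, pT, pM]
            simp [hT]
          omega
      · rw [List.take_succ, List.getElem?_eq_none (by omega)]
        simpa using ihj
  · intro h k hk hnT
    have htake : l.take (k+1) = l.take k ++ [l[k]'hk] := by
      rw [List.take_succ, List.getElem?_eq_getElem hk]; rfl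
    have hstep : (l.take (k+1)).countP pM = (l.take k).countP pM + 1 ∧
        (l.take (k+1)).countP pT = (l.take k).countP pT := by
      rw [htake]
      simp only [List.countP_append, List.countP_cons, List.countP_nil, pT, pM]
      simp [hnT]
    have h2 := h (k+1)
    omega

-- index list of pyRange maps to the chars it fetches
lemma mapIdx (cs : List Char) (N : Nat) (hN : N ≤ cs.length) :
    (PySem.List.pyRange 0 (N : Int) 1).map (fun i => PySem.List.pyGet? cs i)
      = (cs.take N).map some := by
  induction N with
  | zero => simp [PySem.List.pyRange_one_eq_nil]
  | succ N ih =>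
    have h1 : ((N : Int) + 1) = ((N + 1 : Nat) : Int) := by push_cast; ring
    rw [← h1, PySem.List.pyRange_one_succ_right (by positivity), List.map_append,
        ih (by omega)]
    have hNlt : N < cs.length := by omega
    have htake : cs.take (N + 1) = cs.take N ++ [cs[N]'hNlt] := by
      rw [List.take_succ, List.getElem?_eq_getElem hNlt]; rfl
    rw [htake, List.map_append]
    simp [PySem.List.pyGet?_natCast, List.getElem?_eq_getElem hNlt]

-- A's first loop builds the two position lists
lemma buildA (cs : List Char) (N : Nat) (hN : N ≤ cs.length) :
    (PySem.List.pyRange 0 (N : Int) 1).foldl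
      (fun (acc : List Int × List Int) i =>
        match PySem.List.pyGet? cs i with
        | some c => if c = 'T' then (acc.1 ++ [i], acc.2) else (acc.1, acc.2 ++ [i])
        | none => acc)
      ([], [])
    = ((posP pT (cs.take N)).map (fun (q : Nat) => (q : Int)),
       (posP pM (cs.take N)).map (fun (q : Nat) => (q : Int))) := by
  induction N with
  | zero => simp [PySem.List.pyRange_one_eq_nil, posP]
  | succ N ih =>
    have h1 : ((N : Int) + 1) = ((N + 1 : Nat) : Int) := by push_cast; ring
    rw [← h1, PySem.List.pyRange_one_succ_right (by positivity), List.foldl_append,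
        ih (by omega)]
    have hNlt : N < cs.length := by omega
    have htake : cs.take (N + 1) = cs.take N ++ [cs[N]'hNlt] := by
      rw [List.take_succ, List.getElem?_eq_getElem hNlt]; rfl
    have hlen : (cs.take N).length = N := by simp [List.length_take]; omega
    rw [htake, posP_append, posP_append]
    simp only [List.foldl_cons, List.foldl_nil, PySem.List.pyGet?_natCast,
      List.getElem?_eq_getElem hNlt]
    by_cases hc : cs[N]'hNlt = 'T' <;>
      simp [posP, pT, pM, hc, hlen, List.map_append]

-- A's second loop is the conjunction of its conditions over the whole range
lemma loop2_spec (tL mL : List Int) (lm : Int) (a : Int) :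
    solveLoop2 tL mL lm (PySem.List.pyRange a lm 1) = true ↔
      ∀ i : Int, a ≤ i → i < lm →
        PySem.List.pyGetD tL i 0 ≤ PySem.List.pyGetD mL i 0 ∧
        PySem.List.pyGetD mL i 0 ≤ PySem.List.pyGetD tL (i + lm) 0 := by
  by_cases hab : lm ≤ a
  · rw [PySem.List.pyRange_one_eq_nil hab]
    simp only [solveLoop2, true_iff]
    intro i h1 h2; omega
  · push_neg at hab
    have hlen : ((lm - (a+1)).toNat) < ((lm - a).toNat) := by omega
    rw [PySem.List.pyRange_one_cons hab]
    simp only [solveLoop2]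
    by_cases hc1 : PySem.List.pyGetD tL a 0 > PySem.List.pyGetD mL a 0
    · rw [if_pos hc1]
      constructor
      · intro hfalse; exact absurd hfalse (by simp)
      · intro h
        have := h a (le_refl a) hab
        omega
    · rw [if_neg hc1]
      by_cases hc2 : PySem.List.pyGetD tL (a + lm) 0 < PySem.List.pyGetD mL a 0
      · rw [if_pos hc2]
        constructor
        · intro hfalse; exact absurd hfalse (by simp)
        · intro h
          have := h a (le_refl a) hab
          omega
      · rw [if_neg hc2, loop2_spec tL mL lm (a+1)]
        constructor
        · intro h i h1 h2
          rcases eq_or_lt_of_le h1 with rfl | hlt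
          · omega
          · exact h i (by omega) h2
        · intro h i h1 h2
          exact h i (by omega) h2
termination_by (lm - a).toNat
decreasing_by omega

-- the Int-indexed conditions of A's second loop equal IdxF ∧ IdxB
lemma loop2_idx (l : List Char) (hct : l.countP pT = 2 * l.countP pM) :
    (∀ i : Int, 0 ≤ i → i < ((posP pM l).length : Int) →
        PySem.List.pyGetD ((posP pT l).map (fun (q : Nat) => (q : Int))) i 0
          ≤ PySem.List.pyGetD ((posP pM l).map (fun (q : Nat) => (q : Int))) i 0 ∧
        PySem.List.pyGetD ((posP pM l).map (fun (q : Nat) => (q : Int))) i 0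
          ≤ PySem.List.pyGetD ((posP pT l).map (fun (q : Nat) => (q : Int)))
              (i + ((posP pM l).length : Int)) 0)
    ↔ (IdxF l ∧ IdxB l) := by
  have hlt : (posP pT l).length = l.countP pT := length_posP _ _
  have hlm : (posP pM l).length = l.countP pM := length_posP _ _
  have key : ∀ (s : List Nat) (j : Nat), j < s.length →
      PySem.List.pyGetD (s.map (fun (q : Nat) => (q : Int))) (j : Int) 0 = ((s.getD j 0 : Nat) : Int) := by
    intro s j hj
    rw [PySem.List.pyGetD_natCast, List.getD_eq_getElem _ _ (by simpa using hj),
        List.getD_eq_getElem _ _ hj]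
    simp
  constructor
  · intro h
    constructor
    · intro i hi
      have := (h (i : Int) (by positivity) (by exact_mod_cast hi)).1
      rw [key _ _ (by omega), key _ _ hi] at this
      exact_mod_cast this
    · intro i hi
      have := (h (i : Int) (by positivity) (by exact_mod_cast hi)).2
      have hcast : ((i : Int) + ((posP pM l).length : Int)) = ((i + (posP pM l).length : Nat) : Int) := by
        push_cast; ring
      rw [key _ _ hi, hcast, key _ _ (by omega)] at this
      exact_mod_cast this
  · intro ⟨hF, hB⟩ i h0 hi
    have hj : i.toNat < (posP pM l).length := by omega
    have hi' : (i.toNat : Int) = i := by omega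
    constructor
    · have := hF i.toNat hj
      rw [← hi', key _ _ (by omega), key _ _ hj]
      exact_mod_cast this
    · have := hB i.toNat hj
      have hcast : (((i.toNat) : Int) + ((posP pM l).length : Int))
          = ((i.toNat + (posP pM l).length : Nat) : Int) := by push_cast; ring
      rw [← hi', key _ _ hj, hcast, key _ _ (by omega)]
      exact_mod_cast this

-- ===== VERDICT (by name: the statement is the Claim_ definition above) =====
theorem solve_spec : Claim_equal_solve := by
  intro string n _ hpre
  unfold Spec_solve solve solve_alt
  by_cases hn : n ≤ 0
  case pos =>
    by_cases hn0 : n = 0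
    · subst hn0
      simp [PySem.List.pyRange_one_eq_nil (by omega : (0:Int) ≤ 0),
        PySem.List.pyRange_neg_one_eq_nil (by omega : (0:Int) - 1 ≤ -1),
        countScan, solveLoop2, charScan, posP]
    · have h1 : PySem.List.pyRange 0 n 1 = [] := PySem.List.pyRange_one_eq_nil (by omega)
      have h2 : PySem.List.pyRange (n-1) (-1) (-1) = [] :=
        PySem.List.pyRange_neg_one_eq_nil (by omega)
      simp [h1, h2, countScan, solveLoop2, PySem.List.pyRange_one_eq_nil]
  case neg =>
    push_neg at hn
    have hpre' : n ≤ (string.toList.length : Int) := by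
      simpa [PySem.Str.len_eq] using hpre
    set cs := string.toList with hcs
    set N := n.toNat with hNdef
    have hNn : (N : Int) = n := by omega
    have hN : N ≤ cs.length := by omega
    set l := cs.take N with hl
    -- B's forward scan
    have hfwd : countScan cs 0 0 (PySem.List.pyRange 0 (N:Int) 1) = charScan l 0 0 :=
      countScan_eq_charScan cs _ l (mapIdx cs N hN) 0 0
    -- B's backward scan
    have hrev : PySem.List.pyRange ((N:Int) - 1) (-1) (-1)
        = (PySem.List.pyRange 0 (N:Int) 1).reverse := by
      rw [PySem.List.pyRange_neg_one_eq_reverse]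
      norm_num
    have hbwd : countScan cs 0 0 (PySem.List.pyRange ((N:Int) - 1) (-1) (-1))
        = charScan l.reverse 0 0 := by
      rw [hrev]
      refine countScan_eq_charScan cs _ l.reverse ?_ 0 0
      rw [List.map_reverse, mapIdx cs N hN, ← List.map_reverse]
    -- A's first loop
    rw [← hNn, buildA cs N hN, hfwd, hbwd, ← hl]
    dsimp only
    -- counts
    have hcF : charScan l 0 0 = none ∨
        charScan l 0 0 = some ((l.countP pT : Int), (l.countP pM : Int)) := by
      rcases hsome : (charScan l 0 0).isSome with hfalse | htrue
      · left; cases h : charScan l 0 0 <;> simp_all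
      · right; have := charScan_eq_some l 0 0 hsome; simpa using this
    by_cases hct : l.countP pT = 2 * l.countP pM
    · -- counts agree: compare the two loop conditions
      have hmlen : ((posP pM l).map (fun (q : Nat) => (q : Int))).length = (posP pM l).length := by simp
      have htlen : ((posP pT l).map (fun (q : Nat) => (q : Int))).length = (posP pT l).length := by simp
      have hAcnt : (((posP pT l).map (fun (q : Nat) => (q : Int))).length : Int)
          = 2 * (((posP pM l).map (fun (q : Nat) => (q : Int))).length : Int) := by
        rw [htlen, hmlen, length_posP, length_posP]
        push_cast [hct]; ring
      rw [if_neg (not_not_intro hAcnt)]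
      have hprefF := (charScan_isSome_iff l 0 0).trans (prefix_cond l)
      have hprefB := (charScan_isSome_iff l.reverse 0 0).trans (prefix_cond l.reverse)
      have hIdxF := L1 l (by omega)
      have hIdxB := (L2 l hct).trans
        (L1 l.reverse (by simpa using (by omega : l.countP pM ≤ l.countP pT)))
      have hA := (loop2_spec ((posP pT l).map (fun (q : Nat) => (q : Int)))
        ((posP pM l).map (fun (q : Nat) => (q : Int)))
        ((((posP pM l).map (fun (q : Nat) => (q : Int))).length : Int)) 0)
      rw [hmlen] at hA
      rcases hcF with hnone | hsome
      · -- forward scan failed: prefix condition false, so IdxF false, A's loop is false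
        rw [hnone]
        have hFfalse : ¬ IdxF l := by
          rw [hIdxF, ← hprefF]
          simp [hnone]
        have hAfalse : solveLoop2 ((posP pT l).map (fun (q : Nat) => (q : Int)))
            ((posP pM l).map (fun (q : Nat) => (q : Int)))
            (((posP pM l).length : Int))
            (PySem.List.pyRange 0 (((posP pM l).length : Int)) 1) = false := by
          rw [Bool.eq_false_iff, Ne, hA]
          intro hall
          exact hFfalse ((loop2_idx l hct).mp (by intro i h1 h2; exact hall i h1 h2)).1
        simp [hAfalse]
      · rw [hsome]
        dsimp only
        rw [if_neg (not_not_intro (by push_cast [hct]; ring))]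
        have hFtrue : (charScan l 0 0).isSome = true := by rw [hsome]; rfl
        have hIdxFtrue : IdxF l := hIdxF.mpr (hprefF.mp hFtrue)
        have hAiff : solveLoop2 ((posP pT l).map (fun (q : Nat) => (q : Int)))
            ((posP pM l).map (fun (q : Nat) => (q : Int)))
            ((((posP pM l).map (fun (q : Nat) => (q : Int))).length : Int))
            (PySem.List.pyRange 0 ((((posP pM l).map (fun (q : Nat) => (q : Int))).length : Int)) 1) = true
            ↔ IdxB l := by
          rw [hmlen, hA]
          constructor
          · intro hall
            exact ((loop2_idx l hct).mp (by intro i h1 h2; exact hall i h1 h2)).2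
          · intro hB i h1 h2
            exact (loop2_idx l hct).mpr ⟨hIdxFtrue, hB⟩ i h1 h2
        have hBiff : (charScan l.reverse 0 0).isSome ↔ IdxB l := by
          rw [hIdxB, ← hprefB]
        rw [Bool.eq_iff_iff, hAiff, ← hBiff]
    · -- counts differ: both sides are false
      have hAcnt : ¬ ((((posP pT l).map (fun (q : Nat) => (q : Int))).length : Int)
          = 2 * (((posP pM l).map (fun (q : Nat) => (q : Int))).length : Int)) := by
        simp only [List.length_map, length_posP]
        intro hc; apply hct
        exact_mod_cast hc
      rw [if_pos hAcnt]
      rcases hcF with hnone | hsome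
      · rw [hnone]
      · rw [hsome]
        dsimp only
        rw [if_pos (show ¬ (((l.countP pT : Nat) : Int) = 2 * ((l.countP pM : Nat) : Int)) from
          fun hc => hct (by exact_mod_cast hc))]
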